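-- pv_equiv track=rewrite | github.com/SuzanneVdw/exercises_programming1 | 07-tuples/11-assignment-heatwave/student.py | heatwave
-- ===== SOURCE A (Python) =====
-- def heatwave(temperatures):
--     over_25 = 0
--     over_30 = 0
--     for i in temperatures:
--         if i >= 30:
--             over_30 += 1
--         if i >= 25:
--             over_25 += 1
--         else:
--             over_25 = 0
--             over_30 = 0
--         if over_25 >= 5 and over_30 >= 3:
--             return True
--     return False
-- ===== SOURCE B (Python) =====
-- def heatwave(temperatures):
--     # Split into maximal runs of consecutive days >= 25, then test each run.
--     runs = []
--     cur = []
--     for t in temperatures: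
--         if t >= 25:
--             cur.append(t)
--         else:
--             if cur:
--                 runs.append(cur)
--             cur = []
--     if cur:
--         runs.append(cur)
--     return any(len(r) >= 5 and sum(1 for x in r if x >= 30) >= 3 for r in runs)
-- ===== Notes on version B (the rewrite author's own statement) =====
-- stated objective: alternative
-- what changed: Replaces the inline per-element counter state machine with a group-then-aggregate pass: split the input into maximal runs of days >= 25, then check whether any run has length >= 5 and at least 3 days >= 30.
import Mathlib
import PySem

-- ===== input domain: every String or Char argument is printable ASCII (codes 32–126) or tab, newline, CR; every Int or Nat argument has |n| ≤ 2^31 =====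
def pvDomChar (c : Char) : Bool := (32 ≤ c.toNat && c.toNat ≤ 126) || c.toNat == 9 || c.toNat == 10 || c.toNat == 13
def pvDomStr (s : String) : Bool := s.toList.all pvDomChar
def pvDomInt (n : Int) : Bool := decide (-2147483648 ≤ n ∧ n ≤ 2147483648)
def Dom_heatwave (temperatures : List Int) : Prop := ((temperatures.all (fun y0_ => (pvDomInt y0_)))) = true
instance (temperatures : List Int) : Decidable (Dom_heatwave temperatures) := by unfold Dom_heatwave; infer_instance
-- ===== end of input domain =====

-- B replaces A's inline counter state machine by splitting the input into maximal runs of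
-- days >= 25 and testing each run (length >= 5 and >= 3 days >= 30): a different decomposition, same cost.


-- ===== PORT A =====
-- loop with early return: structural recursion carrying the two counters
def heatwaveGo (ts : List Int) (over25 over30 : Int) : Bool :=
  match ts with
  | [] => false
  | i :: rest =>
    let over30 := if i ≥ 30 then over30 + 1 else over30
    let p : Int × Int := if i ≥ 25 then (over25 + 1, over30) else (0, 0)
    if p.1 ≥ 5 ∧ p.2 ≥ 3 then true else heatwaveGo rest p.1 p.2

def heatwave (temperatures : List Int) : Bool :=
  heatwaveGo temperatures 0 0

-- ===== PORT B =====
-- split into maximal runs of consecutive days >= 25 (cur = run being built, in order)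
def heatwaveRuns (ts : List Int) (cur : List Int) : List (List Int) :=
  match ts with
  | [] => if cur ≠ [] then [cur] else []
  | t :: rest =>
    if t ≥ 25 then heatwaveRuns rest (cur ++ [t])
    else (if cur ≠ [] then [cur] else []) ++ heatwaveRuns rest []

def heatwave_alt (temperatures : List Int) : Bool :=
  (heatwaveRuns temperatures []).any
    (fun r => decide ((r.length : Int) ≥ 5) && decide (((r.filter (fun x => 30 ≤ x)).length : Int) ≥ 3))

-- ===== PRECONDITION & SPEC =====
def Spec_heatwave (temperatures : List Int) (out : Bool) : Prop := out = heatwave_alt temperatures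
instance (temperatures : List Int) (out : Bool) : Decidable (Spec_heatwave temperatures out) := by unfold Spec_heatwave; infer_instance

-- ===== CLAIM (what is proved, stated in full; the proofs are below) =====
def Claim_equal_heatwave : Prop := ∀ (temperatures : List Int), Dom_heatwave temperatures → Spec_heatwave temperatures (heatwave temperatures)

-- ===== LEMMAS AND PROOFS =====
-- the run predicate B tests, and its monotonicity under extending a run
def hwTrig (r : List Int) : Bool :=
  decide ((r.length : Int) ≥ 5) && decide (((r.filter (fun x => 30 ≤ x)).length : Int) ≥ 3)

theorem hwTrig_append (r : List Int) (t : Int) (h : hwTrig r = true) : hwTrig (r ++ [t]) = true := by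
  simp only [hwTrig, Bool.and_eq_true, decide_eq_true_eq, List.filter_append, List.length_append] at *
  obtain ⟨h1, h2⟩ := h
  refine ⟨by push_cast; omega, ?_⟩
  push_cast
  omega

theorem runs_any_of_trig (ts : List Int) (cur : List Int) (h : hwTrig cur = true) :
    (heatwaveRuns ts cur).any hwTrig = true := by
  induction ts generalizing cur with
  | nil =>
    have hne : cur ≠ [] := by
      intro hc; rw [hc] at h; simp [hwTrig] at h
    simp [heatwaveRuns, hne, h]
  | cons t rest ih =>
    by_cases ht : t ≥ 25
    · simpa [heatwaveRuns, ht] using ih (cur ++ [t]) (hwTrig_append cur t h)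
    · have hne : cur ≠ [] := by
        intro hc; rw [hc] at h; simp [hwTrig] at h
      simp [heatwaveRuns, ht, hne, h]

-- one loop iteration of A on a day >= 25, phrased via the run counters
theorem go_step_warm (t : Int) (rest cur : List Int) (ht : t ≥ 25) :
    heatwaveGo (t :: rest) (cur.length : Int) ((cur.filter (fun x => 30 ≤ x)).length : Int)
      = if hwTrig (cur ++ [t]) then true
        else heatwaveGo rest ((cur ++ [t]).length : Int)
              (((cur ++ [t]).filter (fun x => 30 ≤ x)).length : Int) := by
  have hl : (((cur ++ [t]).length : Nat) : Int) = (cur.length : Int) + 1 := by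
    simp
  by_cases h30 : (30 : Int) ≤ t
  · have hh : ((((cur ++ [t]).filter (fun x => 30 ≤ x)).length : Nat) : Int)
        = ((cur.filter (fun x => 30 ≤ x)).length : Int) + 1 := by
      simp [List.filter_append, List.filter_cons, h30]
    simp only [heatwaveGo, ge_iff_le, ht, h30, if_pos, hwTrig, Bool.and_eq_true,
      decide_eq_true_eq, hl, hh]
  · have hh : ((((cur ++ [t]).filter (fun x => 30 ≤ x)).length : Nat) : Int)
        = ((cur.filter (fun x => 30 ≤ x)).length : Int) := by
      simp [List.filter_append, List.filter_cons, h30]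
    simp only [heatwaveGo, ge_iff_le, ht, h30, if_pos, hwTrig, Bool.and_eq_true,
      decide_eq_true_eq, hl, hh]
    simp

-- one loop iteration of A on a day < 25: both counters reset and the check cannot fire
theorem go_step_cold (t : Int) (rest : List Int) (a b : Int) (ht : ¬ t ≥ 25) :
    heatwaveGo (t :: rest) a b = heatwaveGo rest 0 0 := by
  simp [heatwaveGo, ht]

theorem go_eq_runs (ts : List Int) (cur : List Int) (h : hwTrig cur = false) :
    heatwaveGo ts (cur.length : Int) ((cur.filter (fun x => 30 ≤ x)).length : Int)
      = (heatwaveRuns ts cur).any hwTrig := by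
  induction ts generalizing cur with
  | nil =>
    by_cases hne : cur = []
    · simp [heatwaveGo, heatwaveRuns, hne]
    · simp [heatwaveGo, heatwaveRuns, hne, h]
  | cons t rest ih =>
    by_cases ht : t ≥ 25
    · rw [go_step_warm t rest cur ht]
      by_cases htr : hwTrig (cur ++ [t]) = true
      · rw [if_pos htr]
        simp only [heatwaveRuns, ge_iff_le, ht, if_pos]
        exact (runs_any_of_trig rest (cur ++ [t]) htr).symm
      · rw [if_neg htr, ih (cur ++ [t]) (by simpa using htr)]
        simp [heatwaveRuns, ht]
    · rw [go_step_cold t rest _ _ ht]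
      have h0 : hwTrig ([] : List Int) = false := by simp [hwTrig]
      have hrec := ih [] h0
      simp only [List.length_nil, List.filter_nil, Int.natCast_zero] at hrec
      rw [hrec]
      by_cases hne : cur = []
      · simp [heatwaveRuns, ht, hne]
      · simp [heatwaveRuns, ht, hne, h]

-- ===== VERDICT (by name: the statement is the Claim_ definition above) =====
theorem heatwave_spec : Claim_equal_heatwave := by
  intro ts _
  unfold Spec_heatwave heatwave heatwave_alt
  rw [show (fun (r : List Int) => decide ((r.length : Int) ≥ 5)
        && decide (((r.filter (fun x => 30 ≤ x)).length : Int) ≥ 3)) = hwTrig from rfl]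
  have := go_eq_runs ts [] (by simp [hwTrig])
  simpa using this
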